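-- pv_equiv track=rewrite | github.com/Hidden-History/ai-memory | src/memory/connectors/github/code_sync.py | _extract_module_level_lines
-- ===== SOURCE A (Python) =====
-- def _extract_module_level_lines(lines: list[str], node_ranges: list[tuple]) -> str:
--     """Extract lines not covered by any class/function definition.
--
--     Args:
--         lines: All source lines
--         node_ranges: List of (start, end, name) tuples for AST nodes
--
--     Returns:
--         Module-level code as string
--     """
--     covered = set()
--     for start, end, _ in node_ranges:
--         covered.update(range(start, end))
--
--     module_lines = []
--     for i, line in enumerate(lines):
--         if i not in covered:
--             module_lines.append(line)
--
--     return "\n".join(module_lines).strip()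
-- ===== SOURCE B (Python) =====
-- def _extract_module_level_lines(lines: list[str], node_ranges: list[tuple]) -> str:
--     """Boundary-marking sweep: mark each range's two boundaries in a delta
--     dict and keep a running coverage counter over the lines, instead of
--     materialising every range into a set."""
--     delta = {}
--     for start, end, _ in node_ranges:
--         s = start if start > 0 else 0
--         if end > s:
--             delta[s] = delta.get(s, 0) + 1
--             delta[end] = delta.get(end, 0) - 1
--     module_lines = []
--     cov = 0
--     for i, line in enumerate(lines):
--         cov += delta.get(i, 0)
--         if cov == 0:
--             module_lines.append(line)
--     return "\n".join(module_lines).strip()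
-- ===== Notes on version B (the rewrite author's own statement) =====
-- stated objective: alternative
-- what changed: Instead of expanding every (start,end) range into a set of covered line numbers, B marks only the two boundaries of each range in a delta dict and sweeps once over the lines with a running coverage counter.
import Mathlib
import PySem

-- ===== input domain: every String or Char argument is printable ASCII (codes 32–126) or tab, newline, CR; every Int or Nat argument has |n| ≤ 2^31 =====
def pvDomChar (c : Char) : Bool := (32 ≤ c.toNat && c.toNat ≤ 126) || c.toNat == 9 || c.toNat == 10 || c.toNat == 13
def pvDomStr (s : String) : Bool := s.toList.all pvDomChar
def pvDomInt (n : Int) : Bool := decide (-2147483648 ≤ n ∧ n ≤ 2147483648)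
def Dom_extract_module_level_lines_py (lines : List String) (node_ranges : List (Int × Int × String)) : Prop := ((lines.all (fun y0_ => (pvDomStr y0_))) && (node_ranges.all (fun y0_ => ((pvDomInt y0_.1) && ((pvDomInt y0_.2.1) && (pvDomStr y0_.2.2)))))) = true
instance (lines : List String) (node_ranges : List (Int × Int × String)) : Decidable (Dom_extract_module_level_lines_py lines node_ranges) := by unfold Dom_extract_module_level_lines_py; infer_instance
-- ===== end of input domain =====

-- B replaces A's "expand every range into a set" with a boundary-marking delta dict and a
-- single sweep with a running coverage counter (objective: alternative algorithm, same result).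

-- ===== PORT A =====
-- covered = set(); for start, end, _ in node_ranges: covered.update(range(start, end))
def pvCoveredA (node_ranges : List (Int × Int × String)) : PySem.Set Int :=
  node_ranges.foldl (fun acc r => PySem.Set.update acc (PySem.List.pyRange r.1 r.2.1 1)) PySem.Set.empty

def extract_module_level_lines_py (lines : List String) (node_ranges : List (Int × Int × String)) : String :=
  let covered := pvCoveredA node_ranges
  let module_lines := (PySem.List.enumerate lines 0).foldl
    (fun acc p => if PySem.Set.contains covered p.1 then acc else acc ++ [p.2]) []
  PySem.Str.strip (PySem.Str.join "\n" module_lines)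

-- ===== PORT B =====
-- delta[s] = delta.get(s,0)+1; delta[end] = delta.get(end,0)-1  (s = start clamped to 0, only nonempty ranges)
def pvDeltaB (node_ranges : List (Int × Int × String)) : PySem.Dict Int Int :=
  node_ranges.foldl (fun d r =>
    let s : Int := if r.1 > 0 then r.1 else 0
    if r.2.1 > s then (d.modify s 0 (· + 1)).modify r.2.1 0 (· - 1) else d) PySem.Dict.empty

-- the sweep: cov += delta.get(i, 0); if cov == 0: module_lines.append(line)
def pvSweepB (delta : PySem.Dict Int Int) : List String → Int → Int → List String
  | [], _, _ => []
  | l :: ls, i, cov =>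
    let cov' := cov + delta.getD i 0
    if cov' = 0 then l :: pvSweepB delta ls (i + 1) cov' else pvSweepB delta ls (i + 1) cov'

def extract_module_level_lines_py_alt (lines : List String) (node_ranges : List (Int × Int × String)) : String :=
  PySem.Str.strip (PySem.Str.join "\n" (pvSweepB (pvDeltaB node_ranges) lines 0 0))

-- ===== PRECONDITION & SPEC =====
def Spec_extract_module_level_lines_py (lines : List String) (node_ranges : List (Int × Int × String)) (out : String) : Prop := out = extract_module_level_lines_py_alt lines node_ranges
instance (lines : List String) (node_ranges : List (Int × Int × String)) (out : String) : Decidable (Spec_extract_module_level_lines_py lines node_ranges out) := by unfold Spec_extract_module_level_lines_py; infer_instance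

-- ===== CLAIM (what is proved, stated in full; the proofs are below) =====
def Claim_equal_extract_module_level_lines_py : Prop := ∀ (lines : List String) (node_ranges : List (Int × Int × String)), Dom_extract_module_level_lines_py lines node_ranges → Spec_extract_module_level_lines_py lines node_ranges (extract_module_level_lines_py lines node_ranges)

-- ===== LEMMAS AND PROOFS =====

-- per-range contribution to the delta dict at key k
def pvDContrib (r : Int × Int × String) (k : Int) : Int :=
  let s : Int := if r.1 > 0 then r.1 else 0
  if r.2.1 > s then (if s = k then 1 else 0) - (if r.2.1 = k then 1 else 0) else 0

-- per-range clamped coverage indicator at line i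
def pvContrib (r : Int × Int × String) (i : Int) : Int :=
  let s : Int := if r.1 > 0 then r.1 else 0
  if r.2.1 > s ∧ s ≤ i ∧ i < r.2.1 then 1 else 0

-- running coverage count at line i
def pvM (rs : List (Int × Int × String)) (i : Int) : Int := (rs.map (pvContrib · i)).sum








theorem pvDeltaB_getD_aux (rs : List (Int × Int × String)) (d : PySem.Dict Int Int) (k : Int) :
    (rs.foldl (fun d r =>
      let s : Int := if r.1 > 0 then r.1 else 0
      if r.2.1 > s then (d.modify s 0 (· + 1)).modify r.2.1 0 (· - 1) else d) d).getD k 0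
    = d.getD k 0 + (rs.map (pvDContrib · k)).sum := by
  induction rs generalizing d with
  | nil => simp
  | cons r rs ih =>
    simp only [List.foldl_cons, List.map_cons, List.sum_cons, ih]
    have hstep : ((let s : Int := if r.1 > 0 then r.1 else 0
        if r.2.1 > s then (d.modify s 0 (· + 1)).modify r.2.1 0 (· - 1) else d) :
        PySem.Dict Int Int).getD k 0 = d.getD k 0 + pvDContrib r k := by
      simp only [pvDContrib]
      by_cases hg : r.2.1 > (if r.1 > 0 then r.1 else 0)
      · rw [if_pos hg, if_pos hg]
        simp only [PySem.Dict.getD_modify]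
        split_ifs <;> subst_vars <;> omega
      · rw [if_neg hg, if_neg hg]; omega
    rw [hstep]; ring

theorem pvDeltaB_getD (rs : List (Int × Int × String)) (k : Int) :
    (pvDeltaB rs).getD k 0 = (rs.map (pvDContrib · k)).sum := by
  simpa using pvDeltaB_getD_aux rs PySem.Dict.empty k

theorem pvM_neg (rs : List (Int × Int × String)) (i : Int) (h : i < 0) : pvM rs i = 0 := by
  refine List.sum_eq_zero ?_
  intro x hx
  obtain ⟨r, _, rfl⟩ := List.mem_map.mp hx
  simp only [pvContrib]
  split_ifs <;> omega

theorem pvContrib_step (r : Int × Int × String) (i : Int) :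
    pvContrib r i = pvContrib r (i - 1) + pvDContrib r i := by
  simp only [pvContrib, pvDContrib]
  split_ifs <;> omega

theorem pvM_step (rs : List (Int × Int × String)) (i : Int) :
    pvM rs i = pvM rs (i - 1) + (pvDeltaB rs).getD i 0 := by
  rw [pvDeltaB_getD]
  simp only [pvM]
  induction rs with
  | nil => simp
  | cons r rs ih =>
    simp only [List.map_cons, List.sum_cons, ih, pvContrib_step r i]
    ring

theorem pvM_eq_zero_iff (rs : List (Int × Int × String)) (i : Int) (hi : 0 ≤ i) :
    pvM rs i = 0 ↔ ∀ r ∈ rs, ¬ (r.1 ≤ i ∧ i < r.2.1) := by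
  induction rs with
  | nil => simp [pvM]
  | cons r rs ih =>
    have hnn : 0 ≤ pvM rs i := by
      refine List.sum_nonneg ?_
      intro x hx
      obtain ⟨q, _, rfl⟩ := List.mem_map.mp hx
      simp only [pvContrib]; split_ifs <;> omega
    have hc : pvContrib r i = 0 ↔ ¬ (r.1 ≤ i ∧ i < r.2.1) := by
      simp only [pvContrib]
      split_ifs <;> omega
    have hcn : 0 ≤ pvContrib r i := by simp only [pvContrib]; split_ifs <;> omega
    have : pvM (r :: rs) i = pvContrib r i + pvM rs i := by simp [pvM]
    rw [this]
    constructor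
    · intro h0 q hq
      rcases List.mem_cons.mp hq with rfl | hq'
      · exact hc.mp (by omega)
      · exact (ih.mp (by omega)) q hq'
    · intro hall
      have h1 : pvContrib r i = 0 := hc.mpr (hall r (List.mem_cons_self ..))
      have h2 : pvM rs i = 0 := ih.mpr (fun q hq => hall q (List.mem_cons_of_mem _ hq))
      omega

theorem mem_pvCoveredA_aux (rs : List (Int × Int × String)) (s : PySem.Set Int) (x : Int) :
    x ∈ rs.foldl (fun acc r => PySem.Set.update acc (PySem.List.pyRange r.1 r.2.1 1)) s
      ↔ x ∈ s ∨ ∃ r ∈ rs, r.1 ≤ x ∧ x < r.2.1 := by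
  induction rs generalizing s with
  | nil => simp
  | cons r rs ih =>
    simp only [List.foldl_cons, ih, PySem.Set.mem_update, PySem.List.mem_pyRange_one,
      List.mem_cons]
    constructor
    · rintro ((h | h) | ⟨q, hq, hc⟩)
      · exact Or.inl h
      · exact Or.inr ⟨r, Or.inl rfl, h⟩
      · exact Or.inr ⟨q, Or.inr hq, hc⟩
    · rintro (h | ⟨q, (rfl | hq), hc⟩)
      · exact Or.inl (Or.inl h)
      · exact Or.inl (Or.inr hc)
      · exact Or.inr ⟨q, hq, hc⟩

theorem mem_pvCoveredA (rs : List (Int × Int × String)) (x : Int) :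
    x ∈ pvCoveredA rs ↔ ∃ r ∈ rs, r.1 ≤ x ∧ x < r.2.1 := by
  simpa [PySem.Set.empty] using mem_pvCoveredA_aux rs PySem.Set.empty x

-- the canonical filtered list both loops compute
def pvFilt (rs : List (Int × Int × String)) : List String → Int → List String
  | [], _ => []
  | l :: ls, i =>
    if pvM rs i = 0 then l :: pvFilt rs ls (i + 1) else pvFilt rs ls (i + 1)

theorem pvSweepB_eq (rs : List (Int × Int × String)) (ls : List String) (i cov : Int)
    (hc : cov = pvM rs (i - 1)) :
    pvSweepB (pvDeltaB rs) ls i cov = pvFilt rs ls i := by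
  induction ls generalizing i cov with
  | nil => rfl
  | cons l ls ih =>
    have hm : cov + (pvDeltaB rs).getD i 0 = pvM rs i := by rw [hc, ← pvM_step]
    simp only [pvSweepB, pvFilt, hm]
    have hrec := ih (i + 1) (pvM rs i) (by norm_num)
    split_ifs <;> rw [hrec]

theorem pvLoopA_eq (rs : List (Int × Int × String)) (ls : List String) (i : Int) (hi : 0 ≤ i)
    (acc : List String) :
    (PySem.List.enumerate ls i).foldl
      (fun acc p => if PySem.Set.contains (pvCoveredA rs) p.1 then acc else acc ++ [p.2]) acc
      = acc ++ pvFilt rs ls i := by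
  induction ls generalizing i acc with
  | nil => simp [PySem.List.enumerate_nil, pvFilt]
  | cons l ls ih =>
    rw [PySem.List.enumerate_cons, List.foldl_cons]
    have hiff : PySem.Set.contains (pvCoveredA rs) i = true ↔ ¬ pvM rs i = 0 := by
      rw [PySem.Set.contains_iff, mem_pvCoveredA, pvM_eq_zero_iff rs i hi]
      constructor
      · rintro ⟨q, hq, hc⟩ hall; exact hall q hq hc
      · intro hn
        by_contra hno
        exact hn (fun q hq hc => hno ⟨q, hq, hc⟩)
    by_cases hm : pvM rs i = 0
    · have hx : PySem.Set.contains (pvCoveredA rs) i = false := by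
        cases h : PySem.Set.contains (pvCoveredA rs) i
        · rfl
        · exact absurd hm (hiff.mp h)
      simp only [pvFilt, hm, if_pos, hx, Bool.false_eq_true, if_false,
        ih (i + 1) (by omega) (acc ++ [l]), List.append_assoc, List.singleton_append]
    · have hx : PySem.Set.contains (pvCoveredA rs) i = true := hiff.mpr hm
      simp only [pvFilt, hm, hx, if_true, if_false, ih (i + 1) (by omega) acc]

-- ===== VERDICT (by name: the statement is the Claim_ definition above) =====
theorem extract_module_level_lines_py_spec : Claim_equal_extract_module_level_lines_py := by
  intro lines rs _
  unfold Spec_extract_module_level_lines_py extract_module_level_lines_py extract_module_level_lines_py_alt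
  have hA := pvLoopA_eq rs lines 0 le_rfl []
  have hB := pvSweepB_eq rs lines 0 0 (by rw [pvM_neg rs (0 - 1) (by omega)])
  simp only [hA, hB, List.nil_append]
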